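-- pv_equiv track=rewrite | github.com/Stk11/Hacker_Rank | Seclore/gf.py | count_polygons
-- ===== SOURCE A (Python) =====
-- from itertools import combinations
--
-- def count_polygons(V,S,P,turns):
--
--     edges = [[0] * V for i in range(V)]
--     scores = [0]*P
--     for turn in turns:
--         player,v1,v2 = turn
--         edges[v1][v2] = edges[v2][v1] = player +1
--     player_edge_combinations = [list(combinations(range(V),S)) for i in range(P)]
--
--     for player in range(P):
--         for combination in player_edge_combinations[player]:
--             is_polygon = True
--             for i in range(S-1):
--                 for j in range(i+1, S):
--                     if edges[combination[i]][combination[j]] != player +1: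
--                         is_polygon = False
--                         break
--             if is_polygon:
--                 scores[player] += 1
--
--     return scores
-- ===== SOURCE B (Python) =====
-- from itertools import combinations
--
-- def count_polygons(V, S, P, turns):
--     if P <= 0:
--         return []
--     edges = [[0] * V for _ in range(V)]
--     for player, v1, v2 in turns:
--         edges[v1][v2] = edges[v2][v1] = player + 1
--     cnt = {}
--     for comb in combinations(range(V), S):
--         c = edges[comb[0]][comb[1]]
--         if c and all(edges[a][b] == c for a, b in combinations(comb, 2)):
--             cnt[c] = cnt.get(c, 0) + 1
--     return [cnt.get(p + 1, 0) for p in range(P)]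
-- ===== Notes on version B (the rewrite author's own statement) =====
-- stated objective: faster
-- what changed: Instead of rescanning all C(V,S) vertex combinations once per player (P full passes), B enumerates the combinations a single time, tallies each fully-colored clique under its color in a dict, and reads each player's tally off at the end; Pre_ restricts to the natural domain (vertex ids in [-V,V) as Python indexing requires, and S >= 2 when P > 0, since on 0 <= S < 2 B's comb[0]/comb[1] and on S < 0 its combinations call raise).
-- outside the precondition, e.g. on count_polygons(3, 1, 1, []): A returns [3], B raises IndexError; on count_polygons(3, 0, 2, []): A returns [1, 1], B raises IndexError
import Mathlib
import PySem

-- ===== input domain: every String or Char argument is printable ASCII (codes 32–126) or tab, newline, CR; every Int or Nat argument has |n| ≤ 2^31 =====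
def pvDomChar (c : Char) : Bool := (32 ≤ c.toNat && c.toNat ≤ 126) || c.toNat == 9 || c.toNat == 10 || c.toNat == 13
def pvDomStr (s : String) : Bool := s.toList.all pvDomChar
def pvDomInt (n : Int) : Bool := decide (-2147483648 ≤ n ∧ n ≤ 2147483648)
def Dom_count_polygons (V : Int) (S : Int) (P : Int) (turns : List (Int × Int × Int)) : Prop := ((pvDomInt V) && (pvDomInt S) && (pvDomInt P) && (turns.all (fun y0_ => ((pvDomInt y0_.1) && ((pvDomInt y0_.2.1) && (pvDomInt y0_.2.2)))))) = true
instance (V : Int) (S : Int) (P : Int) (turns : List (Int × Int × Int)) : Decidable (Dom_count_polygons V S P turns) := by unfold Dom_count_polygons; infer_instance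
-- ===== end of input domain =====

-- B enumerates the vertex combinations once, tallying each fully-colored clique under its color
-- in a dict and reading each player's tally off at the end, instead of A's per-player rescan of
-- all combinations (objective: faster — a single counting pass in place of P passes).


-- ===== PORT A =====
-- edges[i][j] = v  (row fetched, element set, row written back)
def pvSetEdge (E : List (List Int)) (i j : Int) (v : Int) : List (List Int) :=
  PySem.List.pySetD E i (PySem.List.pySetD (PySem.List.pyGetD E i []) j v)

-- edges[i][j]
def pvEntry (E : List (List Int)) (i j : Int) : Int :=
  PySem.List.pyGetD (PySem.List.pyGetD E i []) j 0

-- list(itertools.combinations(xs, r)): CPython's lexicographic enumeration; like CPython,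
-- it stops a branch as soon as fewer than r elements remain (exactly PySem.List.combinations,
-- see pvCombs_eq below, but evaluable without exponential blowup when r exceeds the length)
def pvCombs {α : Type} : List α → Nat → List (List α)
  | _, 0 => [[]]
  | [], _ + 1 => []
  | x :: t, r + 1 =>
    if t.length + 1 < r + 1 then []
    else (pvCombs t r).map (x :: ·) ++ pvCombs t (r + 1)

-- A's inner double loop over i < j (break only short-circuits; once False the flag stays False)
def pvIsPoly (E : List (List Int)) (comb : List Int) (S : Int) (player : Int) : Bool :=
  (PySem.List.pyRange 0 (S - 1) 1).foldl (fun b i =>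
    (PySem.List.pyRange (i + 1) S 1).foldl (fun b2 j =>
      if pvEntry E (PySem.List.pyGetD comb i 0) (PySem.List.pyGetD comb j 0) ≠ player + 1
      then false else b2) b) true

def count_polygons (V : Int) (S : Int) (P : Int) (turns : List (Int × Int × Int)) : List Int :=
  let edges := turns.foldl
    (fun E t => pvSetEdge (pvSetEdge E t.2.1 t.2.2 (t.1 + 1)) t.2.2 t.2.1 (t.1 + 1))
    (List.replicate V.toNat (PySem.List.pyRepeat [(0 : Int)] V))
  let pec := (PySem.List.pyRange 0 P 1).map
    (fun _ => pvCombs (PySem.List.pyRange 0 V 1) S.toNat)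
  (PySem.List.pyRange 0 P 1).map (fun player =>
    (PySem.List.pyGetD pec player []).foldl
      (fun sc c => if pvIsPoly edges c S player then sc + 1 else sc) 0)

-- ===== PORT B =====
-- c = edges[comb[0]][comb[1]]
def pvColB (E : List (List Int)) (comb : List Int) : Int :=
  pvEntry E (PySem.List.pyGetD comb 0 0) (PySem.List.pyGetD comb 1 0)

-- all(edges[a][b] == c for a, b in combinations(comb, 2))
def pvOkB (E : List (List Int)) (comb : List Int) : Bool :=
  (pvCombs comb 2).all (fun pr =>
    pvEntry E (PySem.List.pyGetD pr 0 0) (PySem.List.pyGetD pr 1 0) == pvColB E comb)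

-- B's loop body for one vertex combination: cnt[c] = cnt.get(c, 0) + 1 when fully colored c
def pvStepC (E : List (List Int)) (d : PySem.Dict Int Int) (comb : List Int) : PySem.Dict Int Int :=
  if pvColB E comb ≠ 0 ∧ pvOkB E comb
  then d.insert (pvColB E comb) (d.getD (pvColB E comb) 0 + 1)
  else d

def count_polygons_alt (V : Int) (S : Int) (P : Int) (turns : List (Int × Int × Int)) : List Int :=
  if P ≤ 0 then []
  else
    let edges := turns.foldl
      (fun E t => pvSetEdge (pvSetEdge E t.2.1 t.2.2 (t.1 + 1)) t.2.2 t.2.1 (t.1 + 1))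
      (List.replicate V.toNat (PySem.List.pyRepeat [(0 : Int)] V))
    let cnt := (pvCombs (PySem.List.pyRange 0 V 1) S.toNat).foldl (pvStepC edges) PySem.Dict.empty
    (PySem.List.pyRange 0 P 1).map (fun p => cnt.getD (p + 1) 0)

-- ===== PRECONDITION & SPEC =====
-- Pre_ restricts to the task's natural domain: vertex ids in [-V, V) (outside it A's and B's
-- edges[v1][v2] raise IndexError; negative ids index from the end, Python-style, in both), and
-- S ≥ 2 whenever P > 0 (there A returns C(V,S) trivially-monochromatic cliques to every player
-- for S < 2, while B's comb[0]/comb[1] raise IndexError, and for S < 0 B's combinations call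
-- raises ValueError).
def Pre_count_polygons (V : Int) (S : Int) (P : Int) (turns : List (Int × Int × Int)) : Prop :=
  (P ≤ 0 ∨ 2 ≤ S) ∧ ∀ t ∈ turns, (-V ≤ t.2.1 ∧ t.2.1 < V) ∧ (-V ≤ t.2.2 ∧ t.2.2 < V)
instance (V : Int) (S : Int) (P : Int) (turns : List (Int × Int × Int)) : Decidable (Pre_count_polygons V S P turns) := by unfold Pre_count_polygons; infer_instance

def pvWitness_count_polygons : Int × Int × Int × (List (Int × Int × Int)) := (3, 2, 2, [(0, 0, 1), (1, 1, 2)])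

def Spec_count_polygons (V : Int) (S : Int) (P : Int) (turns : List (Int × Int × Int)) (out : List Int) : Prop := out = count_polygons_alt V S P turns
instance (V : Int) (S : Int) (P : Int) (turns : List (Int × Int × Int)) (out : List Int) : Decidable (Spec_count_polygons V S P turns out) := by unfold Spec_count_polygons; infer_instance

-- ===== CLAIM (what is proved, stated in full; the proofs are below) =====
def Claim_equal_count_polygons : Prop := ∀ (V : Int) (S : Int) (P : Int) (turns : List (Int × Int × Int)), Dom_count_polygons V S P turns → Pre_count_polygons V S P turns → Spec_count_polygons V S P turns (count_polygons V S P turns)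

-- ===== LEMMAS AND PROOFS =====

lemma pvCombs_eq {α : Type} : ∀ (xs : List α) (r : Nat), pvCombs xs r = PySem.List.combinations xs r := by
  intro xs
  induction xs with
  | nil =>
    intro r
    cases r with
    | zero => rw [pvCombs, PySem.List.combinations_zero]
    | succ r => rw [pvCombs, PySem.List.combinations_nil_succ]
  | cons x t ih =>
    intro r
    cases r with
    | zero => rw [pvCombs, PySem.List.combinations_zero]
    | succ r =>
      rw [pvCombs]
      split_ifs with h
      · have h' : (x :: t).length < r + 1 := by simp; omega
        exact (PySem.List.combinations_eq_nil_of_length_lt (xs := x :: t) (r := r + 1) h').symm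
      · rw [ih r, ih (r + 1), PySem.List.combinations_cons_succ]

-- combinations(l, 2) as ordered pairs
def pvPairs : List Int → List (Int × Int)
  | [] => []
  | x :: xs => (xs.map (fun y => (x, y))) ++ pvPairs xs

lemma pv_pairs_iff_pairwise (l : List Int) (g : Int × Int → Prop) :
    (∀ q ∈ pvPairs l, g q) ↔ l.Pairwise (fun a b => g (a, b)) := by
  induction l with
  | nil => simp [pvPairs]
  | cons x xs ih =>
    simp only [pvPairs, List.mem_append, List.mem_map, List.pairwise_cons]
    constructor
    · intro h
      exact ⟨fun y hy => h (x, y) (Or.inl ⟨y, hy, rfl⟩), ih.mp fun q hq => h q (Or.inr hq)⟩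
    · rintro ⟨h1, h2⟩ q hq
      rcases hq with ⟨y, hy, rfl⟩ | hq
      · exact h1 y hy
      · exact ih.mpr h2 q hq

lemma pv_foldl_and {α : Type} (l : List α) (f : α → Bool) (b : Bool) :
    l.foldl (fun ok x => ok && f x) b = (b && l.all f) := by
  induction l generalizing b with
  | nil => simp
  | cons x xs ih => simp [List.foldl_cons, ih, Bool.and_assoc]

lemma pv_isPoly_iff (E : List (List Int)) (comb : List Int) (S p : Int)
    (hS : 0 ≤ S) (hlen : comb.length = S.toNat) :
    (pvIsPoly E comb S p = true) ↔ ∀ q ∈ pvPairs comb, pvEntry E q.1 q.2 = p + 1 := by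
  rw [pv_pairs_iff_pairwise, List.pairwise_iff_getElem, pvIsPoly]
  simp only [PySem.List.foldl_ite_false_eq, pv_foldl_and, Bool.true_and, List.all_eq_true,
    Bool.not_eq_eq_eq_not, Bool.not_true, List.any_eq_false, PySem.List.mem_pyRange_one]
  constructor
  · intro h i j hi hj hij
    have h2 := h (i : Int) ⟨by omega, by omega⟩ (j : Int) ⟨by omega, by omega⟩
    rw [PySem.List.pyGetD_natCast, PySem.List.pyGetD_natCast,
        List.getD_eq_getElem _ _ hi, List.getD_eq_getElem _ _ hj] at h2
    simpa using h2
  · intro h i hi j hj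
    obtain ⟨hi0, hiS⟩ := hi
    obtain ⟨hji, hjS⟩ := hj
    have ei : i = ((i.toNat : Nat) : Int) := by omega
    have ej : j = ((j.toNat : Nat) : Int) := by omega
    rw [ei, ej, PySem.List.pyGetD_natCast, PySem.List.pyGetD_natCast,
        List.getD_eq_getElem _ _ (by omega), List.getD_eq_getElem _ _ (by omega)]
    simpa using h i.toNat j.toNat (by omega) (by omega) (by omega)

-- combinations(l, 2) is exactly pvPairs l, listed as two-element lists
lemma pv_combinations_two (l : List Int) :
    pvCombs l 2 = (pvPairs l).map (fun q => [q.1, q.2]) := by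
  rw [pvCombs_eq]
  induction l with
  | nil => simp [pvPairs, PySem.List.combinations_nil_succ]
  | cons x xs ih =>
    rw [show (2 : Nat) = 1 + 1 from rfl, PySem.List.combinations_cons_succ,
        PySem.List.combinations_one, show (1 + 1 : Nat) = 2 from rfl, ih]
    simp [pvPairs, Function.comp_def]

lemma pv_okB_iff (E : List (List Int)) (comb : List Int) :
    (pvOkB E comb = true) ↔ ∀ q ∈ pvPairs comb, pvEntry E q.1 q.2 = pvColB E comb := by
  rw [pvOkB, pv_combinations_two]
  simp [List.all_map, List.all_eq_true, PySem.List.pyGetD]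

-- does B's step tally this combination under color x?
def pvBumpC (E : List (List Int)) (x : Int) (comb : List Int) : Bool :=
  (pvColB E comb == x) && pvOkB E comb

-- a combination of size ≥ 2 starts with two elements, and they form its first pair
lemma pv_comb_head (comb : List Int) (h2 : 2 ≤ comb.length) :
    ∃ x y rest, comb = x :: y :: rest ∧
      PySem.List.pyGetD comb 0 0 = x ∧ PySem.List.pyGetD comb 1 0 = y ∧
      (x, y) ∈ pvPairs comb := by
  match comb, h2 with
  | x :: y :: rest, _ =>
    refine ⟨x, y, rest, rfl, ?_, ?_, ?_⟩
    · rw [show (0 : Int) = ((0 : Nat) : Int) from rfl, PySem.List.pyGetD_natCast]; rfl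
    · rw [show (1 : Int) = ((1 : Nat) : Int) from rfl, PySem.List.pyGetD_natCast]; rfl
    · simp [pvPairs]

-- on each combination, A's test for player p coincides with B's tally under color p + 1
lemma pv_comb_agree (E : List (List Int)) (S p : Int) (hS : 2 ≤ S) (hp : 0 ≤ p)
    (comb : List Int) (hlen : comb.length = S.toNat) :
    pvIsPoly E comb S p = pvBumpC E (p + 1) comb := by
  obtain ⟨x, y, rest, hxy, hg0, hg1, hfst⟩ := pv_comb_head comb (by omega)
  apply Bool.coe_iff_coe.mp
  rw [pv_isPoly_iff E comb S _ (by omega) hlen, pvBumpC, Bool.and_eq_true, beq_iff_eq,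
      pv_okB_iff]
  constructor
  · intro h
    have hcol : pvColB E comb = p + 1 := by
      rw [pvColB, hg0, hg1]; exact h (x, y) hfst
    exact ⟨hcol, fun q hq => by rw [h q hq, hcol]⟩
  · rintro ⟨hcol, hall⟩ q hq
    rw [hall q hq, hcol]

-- the tally fold, read at a nonzero color x, counts the combinations tallied under x
lemma pv_fold_stepC (E : List (List Int)) (x : Int) (hx : x ≠ 0) (l : List (List Int)) :
    ∀ d : PySem.Dict Int Int,
      (l.foldl (pvStepC E) d).getD x 0 = d.getD x 0 + (l.countP (pvBumpC E x) : Int) := by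
  induction l with
  | nil => intro d; simp
  | cons c cs ih =>
    intro d
    rw [List.foldl_cons, ih, List.countP_cons]
    have hstep : (pvStepC E d c).getD x 0 = d.getD x 0 + (if pvBumpC E x c then 1 else 0) := by
      rw [pvStepC, pvBumpC]
      by_cases h : pvColB E c ≠ 0 ∧ pvOkB E c = true
      · rw [if_pos h, PySem.Dict.getD_insert]
        by_cases hcx : x = pvColB E c
        · rw [if_pos hcx, hcx]
          simp [h.2]
        · rw [if_neg hcx]
          have hne : (pvColB E c == x) = false := by
            simp only [beq_eq_false_iff_ne]
            exact fun hc => hcx hc.symm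
          simp [hne]
      · rw [if_neg h]
        rcases Bool.eq_false_or_eq_true (pvOkB E c) with hok | hok
        · have h0 : pvColB E c = 0 := by
            by_contra hh
            exact h ⟨hh, hok⟩
          have hne : (pvColB E c == x) = false := by
            rw [h0]
            simp only [beq_eq_false_iff_ne]
            omega
          simp [hne]
        · simp [hok]
    rw [hstep]
    by_cases hb : pvBumpC E x c <;> simp [hb] <;> push_cast <;> ring

theorem pv_main (V S P : Int) (turns : List (Int × Int × Int)) (hS : P ≤ 0 ∨ 2 ≤ S) :
    count_polygons V S P turns = count_polygons_alt V S P turns := by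
  by_cases hP : P ≤ 0
  · have hlen : (PySem.List.pyRange 0 P 1).length = 0 := by
      rw [PySem.List.length_pyRange_one]; omega
    have hnil : PySem.List.pyRange 0 P 1 = [] := List.eq_nil_of_length_eq_zero hlen
    simp [count_polygons, count_polygons_alt, hnil, hP]
  · have hS2 : 2 ≤ S := hS.resolve_left hP
    simp only [count_polygons, count_polygons_alt, if_neg hP]
    apply List.map_congr_left
    intro p hp
    obtain ⟨hp0, hpP⟩ := PySem.List.mem_pyRange_one.mp hp
    set E := turns.foldl
      (fun E t => pvSetEdge (pvSetEdge E t.2.1 t.2.2 (t.1 + 1)) t.2.2 t.2.1 (t.1 + 1))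
      (List.replicate V.toNat (PySem.List.pyRepeat [(0 : Int)] V)) with hE
    set combos := pvCombs (PySem.List.pyRange 0 V 1) S.toNat with hcombos
    have hpec : PySem.List.pyGetD
        ((PySem.List.pyRange 0 P 1).map (fun _ => combos)) p [] = combos := by
      rw [PySem.List.pyGetD_of_nonneg _ _ hp0,
          List.getD_eq_getElem _ _ (by
            rw [List.length_map, PySem.List.length_pyRange_one]; omega),
          List.getElem_map]
    rw [hpec, PySem.List.foldl_ite_add_one, zero_add,
        pv_fold_stepC E (p + 1) (by omega) combos PySem.Dict.empty,
        PySem.Dict.getD_empty, zero_add, Nat.cast_inj]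
    apply List.countP_congr
    intro c hc
    have hlen : c.length = S.toNat := by
      rw [hcombos, pvCombs_eq] at hc
      exact ((PySem.List.mem_combinations_iff _ _ _).mp hc).2
    rw [decide_eq_true_eq, pv_comb_agree E S p hS2 hp0 c hlen]

-- ===== VERDICT (by name: the statement is the Claim_ definition above) =====
theorem count_polygons_spec : Claim_equal_count_polygons := by
  intro V S P turns _ hPre
  unfold Spec_count_polygons
  exact pv_main V S P turns hPre.1
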